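-- pv_equiv track=rewrite | github.com/Asadbaig67/RAG-Bot | app.py | getUpdatedQuery
-- ===== SOURCE A (Python) =====
-- def getUpdatedQuery(query, properties):
--     # Check if all the properties are empty, if so return the original query
--     if all(value == "" for key, value in properties.items()):
--         return query
--
--     # Start building the additional info string
--     additional_info = "\nHere is some Information about my Property:"
--
--     # Check each property and append information accordingly
--
--     if properties["adu"] != "":
--         additional_info += "\nMy Property does{} have an ADU".format(
--             "" if properties["adu"].lower() == "yes" else " not"
--         )
--
--     if properties["hudReo"] != "":
--         additional_info += "\nMy Property is{} a HUD REO".format(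
--             "" if properties["hudReo"].lower() == "yes" else " not"
--         )
--
--     if properties["escrowHoldback"] != "":
--         additional_info += "\nMy Property does{} have an Escrow Holdback".format(
--             "" if properties["escrowHoldback"].lower() == "yes" else " not"
--         )
--
--     if properties["rentalIncome"] != "":
--         additional_info += "\nMy Property does{} generate Rental Income".format(
--             "" if properties["rentalIncome"].lower() == "yes" else " not"
--         )
--
--     if properties["onLeave"] != "":
--         additional_info += "\nI am{} on Leave from work".format(
--             "" if properties["onLeave"].lower() == "yes" else " not"
--         )
--
--     # Technology is handled separately
--     if properties["technology"] != "":
--         technology_type = properties["technology"]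
--         # Ensure it is either Wind or Solar, otherwise do not append any info
--         if technology_type.lower() in ["wind", "solar"]:
--             additional_info += "\nMy Property has {} technology".format(technology_type)
--
--     # Return the original query appended with the additional info
--     return query + additional_info
-- ===== SOURCE B (Python) =====
-- # B: one pass over the dict's items classifies each of the five yes/no properties
-- # into a (rank, sentence) pair; a sort by rank restores the fixed output order and
-- # one join builds the body.  Technology is handled separately (a required key).
--
-- _RANK = {
--     "adu": (0, "\nMy Property does{} have an ADU"),
--     "hudReo": (1, "\nMy Property is{} a HUD REO"),
--     "escrowHoldback": (2, "\nMy Property does{} have an Escrow Holdback"),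
--     "rentalIncome": (3, "\nMy Property does{} generate Rental Income"),
--     "onLeave": (4, "\nI am{} on Leave from work"),
-- }
--
--
-- def getUpdatedQuery(query, properties):
--     if all(v == "" for v in properties.values()):
--         return query
--     frags = []
--     for key, value in properties.items():
--         if value != "" and key in _RANK:
--             rank, template = _RANK[key]
--             frags.append((rank, template.format("" if value.lower() == "yes" else " not")))
--     frags.sort(key=lambda p: p[0])
--     info = "\nHere is some Information about my Property:" + "".join(f for _, f in frags)
--     tech = properties["technology"]
--     if tech != "" and tech.lower() in ("wind", "solar"):
--         info += "\nMy Property has {} technology".format(tech)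
--     return query + info
-- ===== Notes on version B (the rewrite author's own statement) =====
-- stated objective: alternative
-- what changed: Instead of A's fixed sequence of five keyed lookups with conditional concatenations, B makes one pass over the dict's items, classifying each present yes/no property into a (rank, sentence) pair, then sorts by rank and joins once; only technology keeps a direct lookup, handled separately as in A.
import Mathlib
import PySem

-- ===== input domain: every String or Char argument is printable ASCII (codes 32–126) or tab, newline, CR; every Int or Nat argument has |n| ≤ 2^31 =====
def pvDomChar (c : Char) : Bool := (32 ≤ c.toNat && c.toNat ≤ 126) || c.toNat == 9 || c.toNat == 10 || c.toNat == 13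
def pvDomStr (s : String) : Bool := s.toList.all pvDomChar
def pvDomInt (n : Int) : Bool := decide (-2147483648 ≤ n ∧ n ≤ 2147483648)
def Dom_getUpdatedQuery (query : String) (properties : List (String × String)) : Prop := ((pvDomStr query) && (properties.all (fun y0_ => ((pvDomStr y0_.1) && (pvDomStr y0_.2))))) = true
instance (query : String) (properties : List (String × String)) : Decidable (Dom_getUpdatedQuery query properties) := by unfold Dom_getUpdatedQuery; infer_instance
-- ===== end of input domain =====

-- B replaces A's fixed sequence of keyed lookups/concatenations by one pass over the dict's
-- items classifying each pair into a (rank, sentence), then a sort by rank and a single join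
-- (objective: alternative — a different traversal, order restored by sorting).


-- ===== PORT A =====
-- `properties[k]` is ported as `d.getD k ""`; under Pre_ (all six keys present, or every value
-- empty so no lookup happens) this is exactly Python's `properties[k]` — a KeyError input is
-- excluded by Pre_.
def getUpdatedQuery (query : String) (properties : List (String × String)) : String :=
  let d := PySem.Dict.ofList properties
  if (d.values).all (fun v => v == "") then query
  else
    let info := "\nHere is some Information about my Property:"
    let info := if d.getD "adu" "" ≠ "" then
        info ++ "\nMy Property does" ++ (if PySem.Str.lower (d.getD "adu" "") == "yes" then "" else " not") ++ " have an ADU"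
      else info
    let info := if d.getD "hudReo" "" ≠ "" then
        info ++ "\nMy Property is" ++ (if PySem.Str.lower (d.getD "hudReo" "") == "yes" then "" else " not") ++ " a HUD REO"
      else info
    let info := if d.getD "escrowHoldback" "" ≠ "" then
        info ++ "\nMy Property does" ++ (if PySem.Str.lower (d.getD "escrowHoldback" "") == "yes" then "" else " not") ++ " have an Escrow Holdback"
      else info
    let info := if d.getD "rentalIncome" "" ≠ "" then
        info ++ "\nMy Property does" ++ (if PySem.Str.lower (d.getD "rentalIncome" "") == "yes" then "" else " not") ++ " generate Rental Income"
      else info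
    let info := if d.getD "onLeave" "" ≠ "" then
        info ++ "\nI am" ++ (if PySem.Str.lower (d.getD "onLeave" "") == "yes" then "" else " not") ++ " on Leave from work"
      else info
    let info := if d.getD "technology" "" ≠ "" then
        let technologyType := d.getD "technology" ""
        if PySem.Str.lower technologyType ∈ ["wind", "solar"] then
          info ++ "\nMy Property has " ++ technologyType ++ " technology"
        else info
      else info
    query ++ info

-- ===== PORT B =====
-- one item (key, value) → its (rank, sentence), or none (B's loop body; technology is not classified here)
def pvClassify (k v : String) : Option (Int × String) :=
  if v = "" then none
  else if k = "adu" then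
    some (0, "\nMy Property does" ++ (if PySem.Str.lower v == "yes" then "" else " not") ++ " have an ADU")
  else if k = "hudReo" then
    some (1, "\nMy Property is" ++ (if PySem.Str.lower v == "yes" then "" else " not") ++ " a HUD REO")
  else if k = "escrowHoldback" then
    some (2, "\nMy Property does" ++ (if PySem.Str.lower v == "yes" then "" else " not") ++ " have an Escrow Holdback")
  else if k = "rentalIncome" then
    some (3, "\nMy Property does" ++ (if PySem.Str.lower v == "yes" then "" else " not") ++ " generate Rental Income")
  else if k = "onLeave" then
    some (4, "\nI am" ++ (if PySem.Str.lower v == "yes" then "" else " not") ++ " on Leave from work")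
  else none

def getUpdatedQuery_alt (query : String) (properties : List (String × String)) : String :=
  let d := PySem.Dict.ofList properties
  if (d.values).all (fun v => v == "") then query
  else
    let frags := d.items.foldl (fun acc kv =>
        match pvClassify kv.1 kv.2 with
        | some p => acc ++ [p]
        | none => acc) []
    let frags := PySem.List.sorted frags (fun p => p.1) false
    let info := "\nHere is some Information about my Property:" ++
      PySem.Str.join "" (frags.map (fun p => p.2))
    -- technology is a direct subscript in B too: `properties["technology"]`, exact under Pre_
    let tech := d.getD "technology" ""
    let info := if tech ≠ "" then
        (if PySem.Str.lower tech ∈ ["wind", "solar"] then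
          info ++ "\nMy Property has " ++ tech ++ " technology"
        else info)
      else info
    query ++ info

-- ===== PRECONDITION & SPEC =====
-- Pre_ excludes exactly the KeyError inputs: unless every value of the dict is empty (then A
-- returns `query` before any lookup), Python A looks up all six fixed keys and raises KeyError
-- if one is missing.
def Pre_getUpdatedQuery (query : String) (properties : List (String × String)) : Prop :=
  (∀ v ∈ (PySem.Dict.ofList properties).values, v = "") ∨
  (∀ k ∈ (["adu", "hudReo", "escrowHoldback", "rentalIncome", "onLeave", "technology"] : List String),
    (PySem.Dict.ofList properties).contains k = true)
instance (query : String) (properties : List (String × String)) : Decidable (Pre_getUpdatedQuery query properties) := by unfold Pre_getUpdatedQuery; infer_instance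
def pvWitness_getUpdatedQuery : String × (List (String × String)) :=
  ("What loans fit?", [("adu", "yes"), ("hudReo", ""), ("escrowHoldback", "No"),
                       ("rentalIncome", ""), ("onLeave", "YES"), ("technology", "Wind")])

def Spec_getUpdatedQuery (query : String) (properties : List (String × String)) (out : String) : Prop := out = getUpdatedQuery_alt query properties
instance (query : String) (properties : List (String × String)) (out : String) : Decidable (Spec_getUpdatedQuery query properties out) := by unfold Spec_getUpdatedQuery; infer_instance

-- ===== CLAIM (what is proved, stated in full; the proofs are below) =====
def Claim_equal_getUpdatedQuery : Prop := ∀ (query : String) (properties : List (String × String)), Dom_getUpdatedQuery query properties → Pre_getUpdatedQuery query properties → Spec_getUpdatedQuery query properties (getUpdatedQuery query properties)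

-- ===== LEMMAS AND PROOFS =====

-- the six keys, in output order, and the rank each key's sentence carries
def pvKeys : List String :=
  ["adu", "hudReo", "escrowHoldback", "rentalIncome", "onLeave"]

def pvRank (k : String) : Int :=
  if k = "adu" then 0 else if k = "hudReo" then 1 else if k = "escrowHoldback" then 2
  else if k = "rentalIncome" then 3 else if k = "onLeave" then 4 else 99

-- B's append-or-skip fold is a filterMap
theorem pv_foldl_classify (l : List (String × String)) (acc : List (Int × String)) :
    l.foldl (fun acc kv => match pvClassify kv.1 kv.2 with
        | some p => acc ++ [p] | none => acc) acc
      = acc ++ l.filterMap (fun kv => pvClassify kv.1 kv.2) := by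
  induction l generalizing acc with
  | nil => simp
  | cons kv rest ih =>
    cases h : pvClassify kv.1 kv.2 <;> simp [List.foldl_cons, h, ih]

-- a filterMap whose function vanishes off a filter can be restricted to it
theorem pv_filterMap_eq_filterMap_filter {α β : Type} (g : α → Option β) (p : α → Bool)
    (xs : List α) (h : ∀ x ∈ xs, p x = false → g x = none) :
    xs.filterMap g = (xs.filter p).filterMap g := by
  induction xs with
  | nil => rfl
  | cons x rest ih =>
    have hrest : ∀ y ∈ rest, p y = false → g y = none := fun y hy => h y (by simp [hy])
    by_cases hp : p x = true
    · simp [hp, List.filterMap_cons, ih hrest]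
    · have hx : g x = none := h x (by simp) (by simpa using hp)
      simp [hp, hx, ih hrest]

-- classifying a key outside pvKeys yields nothing
theorem pv_classify_not_mem (k v : String) (hk : k ∉ pvKeys) : pvClassify k v = none := by
  simp only [pvKeys, List.mem_cons, List.not_mem_nil, or_false, not_or] at hk
  obtain ⟨h1, h2, h3, h4, h5⟩ := hk
  simp [pvClassify, h1, h2, h3, h4, h5]

-- a key absent from the dict contributes nothing (its getD default is "")
theorem pv_classify_absent (d : PySem.Dict String String) (k : String)
    (h : k ∉ d.keys) : pvClassify k (d.getD k "") = none := by
  have hg : d.getD k "" = "" := by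
    apply PySem.Dict.getD_of_not_contains
    rw [Bool.eq_false_iff]
    intro hc
    exact h ((PySem.Dict.contains_iff_mem_keys d k).mp hc)
  rw [hg]; simp [pvClassify]

-- two nodup key lists with matching membership collect permuted fragments
theorem pv_filterMap_perm (g : String → Option (Int × String)) (ks : List String)
    (h1 : ks.Nodup) (h2 : pvKeys.Nodup)
    (hks : ∀ k ∈ ks, k ∉ pvKeys → g k = none)
    (hK : ∀ k ∈ pvKeys, k ∉ ks → g k = none) :
    (ks.filterMap g).Perm (pvKeys.filterMap g) := by
  have e1 : ks.filterMap g = (ks.filter (fun k => decide (k ∈ pvKeys))).filterMap g := by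
    apply pv_filterMap_eq_filterMap_filter
    intro x hx hp
    exact hks x hx (by simpa using hp)
  have e2 : pvKeys.filterMap g = (pvKeys.filter (fun k => decide (k ∈ ks))).filterMap g := by
    apply pv_filterMap_eq_filterMap_filter
    intro x hx hp
    exact hK x hx (by simpa using hp)
  rw [e1, e2]
  apply List.Perm.filterMap
  apply (List.perm_ext_iff_of_nodup (h1.filter _) (h2.filter _)).mpr
  intro x
  simp only [List.mem_filter, decide_eq_true_eq]
  tauto

-- every fragment carries its key's rank
theorem pv_classify_rank (k v : String) (p : Int × String)
    (h : pvClassify k v = some p) : p.1 = pvRank k := by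
  unfold pvClassify at h
  split_ifs at h <;> injection h with h' <;> cases h' <;> simp_all [pvRank]

-- join over an empty separator distributes over cons
theorem pv_join_empty_cons (x : String) (l : List String) :
    PySem.Str.join "" (x :: l) = x ++ PySem.Str.join "" l := by
  cases l with
  | nil => simp [PySem.Str.join, PySem.Chars.join, List.intercalate]
  | cons y r =>
    simp only [PySem.Str.join, List.map_cons, PySem.Chars.join_cons_cons]
    simp

-- the joined sentences of a classified key list, one key at a time
theorem pv_join_filterMap_cons (g : String → Option (Int × String)) (k : String) (ks : List String) :
    PySem.Str.join "" ((List.filterMap g (k :: ks)).map (fun p => p.2))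
      = ((g k).map Prod.snd).getD "" ++ PySem.Str.join "" ((List.filterMap g ks).map (fun p => p.2)) := by
  cases h : g k with
  | none => simp [h, PySem.Str.join, PySem.Chars.join, List.intercalate]
  | some p => simp [h, pv_join_empty_cons]

theorem pv_join_nil : PySem.Str.join "" ([] : List String) = "" := by
  simp [PySem.Str.join, PySem.Chars.join, List.intercalate]

-- A's five conditional concatenations, each rewritten into its key's fragment
theorem pv_stepA_adu (info v : String) :
    (if v ≠ "" then
        info ++ "\nMy Property does" ++ (if PySem.Str.lower v == "yes" then "" else " not") ++ " have an ADU"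
      else info)
      = info ++ ((pvClassify "adu" v).map Prod.snd).getD "" := by
  by_cases h : v = "" <;> simp [pvClassify, h, String.append_assoc]

theorem pv_stepA_hudReo (info v : String) :
    (if v ≠ "" then
        info ++ "\nMy Property is" ++ (if PySem.Str.lower v == "yes" then "" else " not") ++ " a HUD REO"
      else info)
      = info ++ ((pvClassify "hudReo" v).map Prod.snd).getD "" := by
  by_cases h : v = "" <;> simp [pvClassify, h, String.append_assoc]

theorem pv_stepA_escrow (info v : String) :
    (if v ≠ "" then
        info ++ "\nMy Property does" ++ (if PySem.Str.lower v == "yes" then "" else " not") ++ " have an Escrow Holdback"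
      else info)
      = info ++ ((pvClassify "escrowHoldback" v).map Prod.snd).getD "" := by
  by_cases h : v = "" <;> simp [pvClassify, h, String.append_assoc]

theorem pv_stepA_rental (info v : String) :
    (if v ≠ "" then
        info ++ "\nMy Property does" ++ (if PySem.Str.lower v == "yes" then "" else " not") ++ " generate Rental Income"
      else info)
      = info ++ ((pvClassify "rentalIncome" v).map Prod.snd).getD "" := by
  by_cases h : v = "" <;> simp [pvClassify, h, String.append_assoc]

theorem pv_stepA_onLeave (info v : String) :
    (if v ≠ "" then
        info ++ "\nI am" ++ (if PySem.Str.lower v == "yes" then "" else " not") ++ " on Leave from work"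
      else info)
      = info ++ ((pvClassify "onLeave" v).map Prod.snd).getD "" := by
  by_cases h : v = "" <;> simp [pvClassify, h, String.append_assoc]

-- ===== VERDICT (by name: the statement is the Claim_ definition above) =====
set_option maxHeartbeats 3200000 in
theorem getUpdatedQuery_spec : Claim_equal_getUpdatedQuery := by
  intro query properties _ _
  unfold Spec_getUpdatedQuery getUpdatedQuery getUpdatedQuery_alt
  by_cases hall : ((PySem.Dict.ofList properties).values).all (fun v => v == "")
  · simp only [hall, if_true]
  · simp only [hall, if_false, Bool.false_eq_true]
    set d := PySem.Dict.ofList properties with hd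
    have hnd : d.keys.Nodup := PySem.Dict.nodup_keys_ofList properties
    rw [pv_foldl_classify]
    simp only [List.nil_append]
    rw [PySem.Dict.items_eq_map_keys d hnd ""]
    rw [List.filterMap_map]
    have hperm : (pvKeys.filterMap (fun k => pvClassify k (d.getD k ""))).Perm
        (d.keys.filterMap ((fun kv : String × String => pvClassify kv.1 kv.2) ∘ (fun k => (k, d.getD k "")))) := by
      refine (pv_filterMap_perm (fun k => pvClassify k (d.getD k "")) d.keys hnd (by decide) ?_ ?_).symm
      · intro k _ hk; exact pv_classify_not_mem k _ hk
      · intro k _ hk; exact pv_classify_absent d k hk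
    have hpvkeys : pvKeys.Pairwise (fun a b => pvRank a < pvRank b) := by decide
    have hpw : (pvKeys.filterMap (fun k => pvClassify k (d.getD k ""))).Pairwise
        (fun a b : Int × String => a.1 < b.1) := by
      apply List.pairwise_filterMap.mpr
      exact List.Pairwise.imp (fun hab x hx y hy => by
        rw [pv_classify_rank _ _ _ hx, pv_classify_rank _ _ _ hy]; exact hab) hpvkeys
    rw [PySem.List.sorted_eq_of_perm_of_pairwise_lt _ _ _ hperm hpw]
    simp only [pvKeys, pv_join_filterMap_cons]
    rw [pv_stepA_onLeave, pv_stepA_rental, pv_stepA_escrow, pv_stepA_hudReo, pv_stepA_adu]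
    by_cases h6 : d.getD "technology" "" = "" <;>
      by_cases h7 : PySem.Str.lower (d.getD "technology" "") ∈ (["wind", "solar"] : List String) <;>
      simp [h6, h7, String.append_assoc, pv_join_nil, String.append_empty]
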